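-- pv_equiv track=rewrite | github.com/malik-ali/generative-grading | scripts/process_data.py | tokenize_code
-- ===== SOURCE A (Python) =====
-- def tokenize_code(code_str):
--     ret = []
--     word = ""
--     for ch in code_str:
--         if word and (ch.isspace() or not ch.isalnum()):
--             ret.append(word)
--             word = ""
--         if ch.isspace():
--             continue
--         elif not ch.isalnum():
--             ret.append(ch)
--         else:
--             word += ch
--     if word:
--         ret.append(word)
--     return ret
-- ===== SOURCE B (Python) =====
-- from itertools import groupby
--
-- def tokenize_code(code_str):
--     ret = []
--     for is_word, run in groupby(code_str, key=str.isalnum):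
--         if is_word:
--             ret.append(''.join(run))
--         else:
--             ret.extend(ch for ch in run if not ch.isspace())
--     return ret
-- ===== Notes on version B (the rewrite author's own statement) =====
-- stated objective: faster
-- what changed: Replaces the per-character state machine (pending-word buffer with flush conditions) by itertools.groupby on isalnum: alnum runs are joined into one token, non-alnum runs emit their non-space characters individually.
import Mathlib
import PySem

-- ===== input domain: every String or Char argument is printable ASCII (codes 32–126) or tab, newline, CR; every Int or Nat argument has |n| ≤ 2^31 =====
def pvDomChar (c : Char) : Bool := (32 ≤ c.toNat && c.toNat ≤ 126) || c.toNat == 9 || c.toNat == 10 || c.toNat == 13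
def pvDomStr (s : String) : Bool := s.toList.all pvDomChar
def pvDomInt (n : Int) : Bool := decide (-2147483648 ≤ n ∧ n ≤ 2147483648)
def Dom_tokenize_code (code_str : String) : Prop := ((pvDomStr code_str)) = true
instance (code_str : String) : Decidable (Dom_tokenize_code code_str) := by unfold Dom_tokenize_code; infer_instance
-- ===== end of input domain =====

-- B replaces A's per-character pending-word state machine by grouping the string
-- into maximal isalnum/non-isalnum runs (itertools.groupby) and emitting each run at once.

-- ===== PORT A =====
-- Python's growing str `word` is carried as its list of characters; it becomes a
-- String (String.mk) exactly where Python appends it to `ret`.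
def pvLoopA (cs : List Char) (ret : List String) (word : List Char) : List String :=
  match cs with
  | [] => if word ≠ [] then ret ++ [String.mk word] else ret
  | c :: rest =>
    -- if word and (ch.isspace() or not ch.isalnum()): flush word
    let p : List String × List Char :=
      if word ≠ [] ∧ (PySem.Chars.isspace c || !PySem.Chars.isalnum c) then
        (ret ++ [String.mk word], [])
      else (ret, word)
    if PySem.Chars.isspace c then pvLoopA rest p.1 p.2
    else if !PySem.Chars.isalnum c then pvLoopA rest (p.1 ++ [String.mk [c]]) p.2
    else pvLoopA rest p.1 (p.2 ++ [c])

def tokenize_code (code_str : String) : List String :=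
  pvLoopA code_str.toList [] []

-- ===== PORT B =====
-- groupby(code_str, key=str.isalnum): the list of (key, run) groups, maximal runs.
def pvRuns (cs : List Char) : List (Bool × List Char) :=
  match cs with
  | [] => []
  | c :: rest =>
    let k := PySem.Chars.isalnum c
    (k, c :: rest.takeWhile (fun d => PySem.Chars.isalnum d == k)) ::
      pvRuns (rest.dropWhile (fun d => PySem.Chars.isalnum d == k))
termination_by cs.length
decreasing_by
  simp only [List.length_cons]
  exact Nat.lt_succ_of_le (List.length_dropWhile_le _ _)

-- one group's contribution: a joined word, or the run's non-space chars one by one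
def pvEmit (g : Bool × List Char) : List String :=
  if g.1 then [String.mk g.2]
  else (g.2.filter (fun c => !PySem.Chars.isspace c)).map (fun c => String.mk [c])

def tokenize_code_alt (code_str : String) : List String :=
  (pvRuns code_str.toList).flatMap pvEmit

-- ===== PRECONDITION & SPEC =====
def Spec_tokenize_code (code_str : String) (out : List String) : Prop := out = tokenize_code_alt code_str
instance (code_str : String) (out : List String) : Decidable (Spec_tokenize_code code_str out) := by unfold Spec_tokenize_code; infer_instance

-- ===== CLAIM (what is proved, stated in full; the proofs are below) =====
def Claim_equal_tokenize_code : Prop := ∀ (code_str : String), Dom_tokenize_code code_str → Spec_tokenize_code code_str (tokenize_code code_str)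

-- ===== LEMMAS AND PROOFS =====

theorem pv_alnum_not_space (c : Char) (h : PySem.Chars.isalnum c = true) :
    PySem.Chars.isspace c = false := by
  have hA : ('A':Char).val.toNat = 65 := rfl
  have hZ : ('Z':Char).val.toNat = 90 := rfl
  have ha : ('a':Char).val.toNat = 97 := rfl
  have hz : ('z':Char).val.toNat = 122 := rfl
  have h0 : ('0':Char).val.toNat = 48 := rfl
  have h9 : ('9':Char).val.toNat = 57 := rfl
  simp only [PySem.Chars.isalnum, PySem.Chars.isalpha, PySem.Chars.isdigit,
    PySem.Chars.isupper, PySem.Chars.islower, PySem.Chars.isspace, Char.toNat,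
    Char.le_def, UInt32.le_iff_toNat_le, Bool.or_eq_true, Bool.and_eq_true,
    decide_eq_true_eq] at h ⊢
  simp only [Bool.or_eq_false_iff, Bool.and_eq_false_iff, decide_eq_false_iff_not]
  omega

def pvFlat (cs : List Char) : List String := (pvRuns cs).flatMap pvEmit

-- one non-alnum char prepended to a non-alnum group's chars
theorem pvEmit_false_cons (c : Char) (t : List Char) :
    pvEmit (false, c :: t) =
      (if PySem.Chars.isspace c then [] else [String.mk [c]]) ++ pvEmit (false, t) := by
  by_cases hsp : PySem.Chars.isspace c = true <;> simp [pvEmit, List.filter, hsp]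

-- peeling one non-alnum character off the front
theorem pvFlat_cons_not_alnum (c : Char) (cs : List Char)
    (hc : PySem.Chars.isalnum c = false) :
    pvFlat (c :: cs) =
      (if PySem.Chars.isspace c then [] else [String.mk [c]]) ++ pvFlat cs := by
  cases cs with
  | nil =>
    rw [pvFlat, pvRuns]
    simp only [hc, List.takeWhile_nil, List.dropWhile_nil]
    rw [List.flatMap_cons, pvEmit_false_cons]
    simp [pvEmit, pvFlat, pvRuns]
  | cons d cs2 =>
    by_cases hd : PySem.Chars.isalnum d = true
    · rw [pvFlat, pvRuns]
      simp only [hc, List.takeWhile_cons, List.dropWhile_cons, hd]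
      rw [List.flatMap_cons, pvEmit_false_cons]
      simp [pvEmit, pvFlat]
    · simp only [Bool.not_eq_true] at hd
      rw [pvFlat, pvRuns]
      simp only [hc]
      conv_rhs => rw [pvFlat, pvRuns]
      simp only [hd, List.takeWhile_cons, List.dropWhile_cons]
      rw [List.flatMap_cons, List.flatMap_cons, pvEmit_false_cons]
      simp [hd]

-- peeling a maximal alnum run off the front (the next char, if any, is not alnum)
theorem pvFlat_word_append (w cs : List Char)
    (hw : ∀ a ∈ w, PySem.Chars.isalnum a = true)
    (hcs : cs = [] ∨ ∃ d rest, cs = d :: rest ∧ PySem.Chars.isalnum d = false) :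
    pvFlat (w ++ cs) = (if w = [] then [] else [String.mk w]) ++ pvFlat cs := by
  cases w with
  | nil => simp
  | cons a w' =>
    have ha : PySem.Chars.isalnum a = true := hw a (by simp)
    have hw' : ∀ b ∈ w', PySem.Chars.isalnum b = true := fun b hb => hw b (by simp [hb])
    have htw : List.takeWhile (fun d => PySem.Chars.isalnum d) w' = w' :=
      List.takeWhile_eq_self_iff.mpr (by intro b hb; simp [hw' b hb])
    have htcs : List.takeWhile (fun d => PySem.Chars.isalnum d) cs = [] := by
      rcases hcs with h | ⟨d, rest, rfl, hd⟩
      · simp [h]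
      · simp [List.takeWhile, hd]
    have hdcs : List.dropWhile (fun d => PySem.Chars.isalnum d) cs = cs := by
      rcases hcs with h | ⟨d, rest, rfl, hd⟩
      · simp [h]
      · simp [List.dropWhile, hd]
    rw [List.cons_append, pvFlat, pvRuns]
    simp only [ha]
    rw [List.takeWhile_append, List.dropWhile_append]
    simp [htw, htcs, hdcs, hw', pvEmit, pvFlat]
    rw [if_pos hw']

theorem pvLoopA_eq_flat (cs : List Char) :
    ∀ (ret : List String) (w : List Char),
      (∀ a ∈ w, PySem.Chars.isalnum a = true) →
      pvLoopA cs ret w = ret ++ pvFlat (w ++ cs) := by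
  induction cs with
  | nil =>
    intro ret w hw
    rw [pvLoopA, pvFlat_word_append w [] hw (Or.inl rfl)]
    by_cases h : w = [] <;> simp [h, pvFlat, pvRuns]
  | cons c rest ih =>
    intro ret w hw
    by_cases hc : PySem.Chars.isalnum c = true
    · have hs : PySem.Chars.isspace c = false := pv_alnum_not_space c hc
      have hwc : ∀ a ∈ w ++ [c], PySem.Chars.isalnum a = true := by
        intro a ha
        rcases List.mem_append.mp ha with h | h
        · exact hw a h
        · simp only [List.mem_singleton] at h; exact h ▸ hc
      rw [pvLoopA]
      simp only [hc, hs, Bool.not_true, Bool.or_false, and_false, if_false,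
        Bool.false_eq_true]
      rw [ih ret (w ++ [c]) hwc, List.append_assoc, List.singleton_append]
    · simp only [Bool.not_eq_true] at hc
      have hrhs : pvFlat (w ++ c :: rest) =
          (if w = [] then [] else [String.mk w]) ++
            ((if PySem.Chars.isspace c then [] else [String.mk [c]]) ++ pvFlat rest) := by
        rw [pvFlat_word_append w (c :: rest) hw (Or.inr ⟨c, rest, rfl, hc⟩),
          pvFlat_cons_not_alnum c rest hc]
      rw [pvLoopA, hrhs]
      simp only [hc, Bool.not_false, Bool.or_true, and_true]
      by_cases hwn : w = []
      · simp only [hwn, ne_eq, not_true_eq_false, if_false, if_true]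
        by_cases hsp : PySem.Chars.isspace c = true
        · simp only [hsp, if_true]
          rw [ih ret [] (by simp)]
          simp
        · simp only [Bool.not_eq_true] at hsp
          simp only [hsp, Bool.false_eq_true, if_false]
          rw [ih (ret ++ [String.mk [c]]) [] (by simp)]
          simp
      · simp only [ne_eq, hwn, not_false_eq_true, if_true]
        by_cases hsp : PySem.Chars.isspace c = true
        · simp only [hsp, if_true]
          rw [ih (ret ++ [String.mk w]) [] (by simp)]
          simp
        · simp only [Bool.not_eq_true] at hsp
          simp only [hsp, Bool.false_eq_true, if_false]
          rw [ih (ret ++ [String.mk w] ++ [String.mk [c]]) [] (by simp)]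
          simp

-- ===== VERDICT (by name: the statement is the Claim_ definition above) =====
theorem tokenize_code_spec : Claim_equal_tokenize_code := by
  intro s _
  unfold Spec_tokenize_code tokenize_code tokenize_code_alt
  rw [pvLoopA_eq_flat s.toList [] [] (by simp)]
  simp [pvFlat]
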